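-- pv_equiv track=rewrite | github.com/firedrakeproject/firedrake | python/fluidity/diagnostics/annulus_mesh.py | GenerateAnnulusRZPhiToNode
-- ===== SOURCE A (Python) =====
-- def GenerateAnnulusRZPhiToNode(nRCoords, nZCoords, phiPoints):
--     """
--     Generate the map from r, z phi IDs to node IDs for a structured 3D linear
--     tet annulus mesh
--     """
--
--     rzphiToNode = []
--     index = 0
--     for i in range(nRCoords):
--         rzphiToNode.append([])
--         for j in range(nZCoords):
--             rzphiToNode[i].append([])
--             for k in range(phiPoints):
--                 rzphiToNode[i][j].append(index)
--                 index += 1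
--
--     return rzphiToNode
-- ===== SOURCE B (Python) =====
-- def _chunk(xs, size, count):
--     """Split xs into `count` consecutive slices of `size` elements each."""
--     return [xs[t * size:(t + 1) * size] for t in range(count)]
--
--
-- def GenerateAnnulusRZPhiToNode(nRCoords, nZCoords, phiPoints):
--     """
--     Generate the map from r, z phi IDs to node IDs for a structured 3D linear
--     tet annulus mesh
--     """
--     nR = max(nRCoords, 0)
--     nZ = max(nZCoords, 0)
--     nP = max(phiPoints, 0)
--     flat = list(range(nR * nZ * nP))
--     return [_chunk(plane, nP, nZ) for plane in _chunk(flat, nZ * nP, nR)]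
-- ===== Notes on version B (the rewrite author's own statement) =====
-- stated objective: alternative
-- what changed: Replaces the stateful triple nested loop threading a running node counter with three staged passes: generate the whole flat index list once with range, then reshape it by slicing it into planes and each plane into rows via a chunk helper.
import Mathlib
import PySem

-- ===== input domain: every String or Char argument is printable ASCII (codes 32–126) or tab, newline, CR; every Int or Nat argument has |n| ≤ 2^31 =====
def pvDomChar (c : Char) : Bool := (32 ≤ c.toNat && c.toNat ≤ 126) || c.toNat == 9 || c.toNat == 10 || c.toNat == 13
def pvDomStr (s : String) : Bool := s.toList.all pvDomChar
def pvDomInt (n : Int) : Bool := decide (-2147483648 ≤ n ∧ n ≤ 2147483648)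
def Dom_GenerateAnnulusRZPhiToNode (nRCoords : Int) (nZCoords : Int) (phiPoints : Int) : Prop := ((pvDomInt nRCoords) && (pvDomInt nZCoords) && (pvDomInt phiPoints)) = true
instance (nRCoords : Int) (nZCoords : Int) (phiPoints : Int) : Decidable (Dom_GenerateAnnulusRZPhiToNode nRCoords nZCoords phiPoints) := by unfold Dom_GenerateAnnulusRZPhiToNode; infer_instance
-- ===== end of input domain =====

-- B drops A's running node counter: it generates the flat index list once and reshapes it
-- by slicing (chunking) into planes and rows (objective: alternative staged-pass algorithm).

-- ===== PORT A =====
-- Triple loop threading state (listSoFar, index); 'append to rzphiToNode[i]' becomes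
-- building the current (inner) list and appending it once finished, value for value.
def GenerateAnnulusRZPhiToNode (nRCoords : Int) (nZCoords : Int) (phiPoints : Int) : List (List (List Int)) :=
  let st :=
    (PySem.List.pyRange 0 nRCoords 1).foldl
      (fun (st : List (List (List Int)) × Int) _i =>
        let stj :=
          (PySem.List.pyRange 0 nZCoords 1).foldl
            (fun (st2 : List (List Int) × Int) _j =>
              let stk :=
                (PySem.List.pyRange 0 phiPoints 1).foldl
                  (fun (st3 : List Int × Int) _k => (st3.1 ++ [st3.2], st3.2 + 1))
                  ([], st2.2)
              (st2.1 ++ [stk.1], stk.2))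
            ([], st.2)
        (st.1 ++ [stj.1], stj.2))
      ([], 0)
  st.1

-- ===== PORT B =====
-- _chunk(xs, size, count) = [xs[t*size:(t+1)*size] for t in range(count)]
def pvChunk {α : Type} (xs : List α) (size : Int) (count : Int) : List (List α) :=
  (PySem.List.pyRange 0 count 1).map
    (fun t => PySem.List.slice xs (some (t * size)) (some ((t + 1) * size)))

def GenerateAnnulusRZPhiToNode_alt (nRCoords : Int) (nZCoords : Int) (phiPoints : Int) : List (List (List Int)) :=
  let nR := max nRCoords 0
  let nZ := max nZCoords 0
  let nP := max phiPoints 0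
  let flat := PySem.List.pyRange 0 (nR * nZ * nP) 1
  (pvChunk flat (nZ * nP) nR).map (fun plane => pvChunk plane nP nZ)

-- ===== PRECONDITION & SPEC =====
def Spec_GenerateAnnulusRZPhiToNode (nRCoords : Int) (nZCoords : Int) (phiPoints : Int) (out : List (List (List Int))) : Prop := out = GenerateAnnulusRZPhiToNode_alt nRCoords nZCoords phiPoints
instance (nRCoords : Int) (nZCoords : Int) (phiPoints : Int) (out : List (List (List Int))) : Decidable (Spec_GenerateAnnulusRZPhiToNode nRCoords nZCoords phiPoints out) := by unfold Spec_GenerateAnnulusRZPhiToNode; infer_instance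

-- ===== CLAIM (what is proved, stated in full; the proofs are below) =====
def Claim_equal_GenerateAnnulusRZPhiToNode : Prop := ∀ (nRCoords : Int) (nZCoords : Int) (phiPoints : Int), Dom_GenerateAnnulusRZPhiToNode nRCoords nZCoords phiPoints → Spec_GenerateAnnulusRZPhiToNode nRCoords nZCoords phiPoints (GenerateAnnulusRZPhiToNode nRCoords nZCoords phiPoints)

-- ===== LEMMAS AND PROOFS =====

-- Innermost loop (snoc induction): appending the running index once per element from base b.
theorem pvFoldK (l : List Int) (acc : List Int) (b : Int) :
    l.foldl (fun (st3 : List Int × Int) _k => (st3.1 ++ [st3.2], st3.2 + 1)) (acc, b)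
      = (acc ++ (List.range l.length).map (fun (t : Nat) => b + (t : Int)), b + l.length) := by
  induction l using List.reverseRecOn with
  | nil => simp
  | append_singleton l x ih =>
    rw [List.foldl_append, ih]
    simp only [List.foldl_cons, List.foldl_nil, List.length_append, List.length_singleton,
      List.range_succ, List.map_append, List.map_cons, List.map_nil, Prod.mk.injEq]
    constructor
    · rw [List.append_assoc]
    · push_cast; ring

-- Middle loop: each iteration appends one inner block and advances the index by p.toNat.
theorem pvFoldJ (phiPoints : Int) (l : List Int) (acc : List (List Int)) (b : Int) :
    l.foldl
        (fun (st2 : List (List Int) × Int) _j =>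
          let stk :=
            (PySem.List.pyRange 0 phiPoints 1).foldl
              (fun (st3 : List Int × Int) _k => (st3.1 ++ [st3.2], st3.2 + 1))
              ([], st2.2)
          (st2.1 ++ [stk.1], stk.2)) (acc, b)
      = (acc ++ (List.range l.length).map
            (fun (j : Nat) => (List.range phiPoints.toNat).map
              (fun (t : Nat) => b + (j : Int) * phiPoints.toNat + (t : Int))),
         b + l.length * phiPoints.toNat) := by
  induction l using List.reverseRecOn with
  | nil => simp
  | append_singleton l x ih =>
    rw [List.foldl_append, ih]
    have hlen : ((phiPoints : Int) - 0).toNat = phiPoints.toNat := by omega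
    simp only [List.foldl_cons, List.foldl_nil, pvFoldK, PySem.List.length_pyRange_one, hlen,
      List.length_append, List.length_singleton, List.range_succ, List.map_append, List.map_cons,
      List.map_nil, List.nil_append, Prod.mk.injEq]
    constructor
    · rw [List.append_assoc]
    · push_cast; ring

-- Outer loop: each iteration appends one (nZ × phi) block, advancing the index by nZ.toNat*p.toNat.
theorem pvFoldI (nZCoords phiPoints : Int) (l : List Int) (acc : List (List (List Int))) (b : Int) :
    l.foldl
        (fun (st : List (List (List Int)) × Int) _i =>
          let stj :=
            (PySem.List.pyRange 0 nZCoords 1).foldl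
              (fun (st2 : List (List Int) × Int) _j =>
                let stk :=
                  (PySem.List.pyRange 0 phiPoints 1).foldl
                    (fun (st3 : List Int × Int) _k => (st3.1 ++ [st3.2], st3.2 + 1))
                    ([], st2.2)
                (st2.1 ++ [stk.1], stk.2))
              ([], st.2)
          (st.1 ++ [stj.1], stj.2)) (acc, b)
      = (acc ++ (List.range l.length).map
            (fun (i : Nat) => (List.range nZCoords.toNat).map
              (fun (j : Nat) => (List.range phiPoints.toNat).map
                (fun (t : Nat) => b + (i : Int) * (nZCoords.toNat * phiPoints.toNat)
                            + (j : Int) * phiPoints.toNat + (t : Int)))),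
         b + l.length * (nZCoords.toNat * phiPoints.toNat)) := by
  induction l using List.reverseRecOn with
  | nil => simp
  | append_singleton l x ih =>
    rw [List.foldl_append, ih]
    have hlen : ((nZCoords : Int) - 0).toNat = nZCoords.toNat := by omega
    simp only [List.foldl_cons, List.foldl_nil, pvFoldJ, PySem.List.length_pyRange_one, hlen,
      List.length_append, List.length_singleton, List.range_succ, List.map_append, List.map_cons,
      List.map_nil, List.nil_append, Prod.mk.injEq]
    constructor
    · rw [List.append_assoc]
    · push_cast; ring

-- Slicing a contiguous integer range yields the corresponding sub-range.
theorem pvSlicePyRange (lo hi u v : Int) (hu : 0 ≤ u) (huv : u ≤ v) (hv : lo + v ≤ hi) :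
    PySem.List.slice (PySem.List.pyRange lo hi 1) (some u) (some v)
      = PySem.List.pyRange (lo + u) (lo + v) 1 := by
  rw [PySem.List.slice_toNat _ hu (le_trans hu huv)]
  apply List.ext_getElem
  · simp only [List.length_take, List.length_drop, PySem.List.length_pyRange_one]
    omega
  · intro k h1 h2
    rw [List.getElem_take, List.getElem_drop, PySem.List.getElem_pyRange_one,
      PySem.List.getElem_pyRange_one]
    simp only [List.length_take, List.length_drop, PySem.List.length_pyRange_one] at h1
    push_cast
    omega

-- Chunking pyRange lo hi 1 with nonneg size: chunk t is the sub-range starting at lo + t*size.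
theorem pvChunkPyRange (lo : Int) (size count : Int) (hs : 0 ≤ size) (hc : 0 ≤ count) :
    pvChunk (PySem.List.pyRange lo (lo + count * size) 1) size count
      = (List.range count.toNat).map
          (fun (t : Nat) => PySem.List.pyRange (lo + (t : Int) * size) (lo + ((t : Int) + 1) * size) 1) := by
  unfold pvChunk
  rw [PySem.List.pyRange_one 0 count]
  rw [List.map_map]
  have hcc : (count - 0).toNat = count.toNat := by omega
  rw [hcc]
  apply List.map_congr_left
  intro t ht
  have htc : (t : Int) < count := by
    have := List.mem_range.mp ht; omega
  simp only [Function.comp, zero_add]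
  rw [pvSlicePyRange _ _ _ _ (by positivity) (by nlinarith) (by nlinarith)]

-- ===== VERDICT (by name: the statement is the Claim_ definition above) =====
theorem GenerateAnnulusRZPhiToNode_spec : Claim_equal_GenerateAnnulusRZPhiToNode := by
  intro nR nZ p _
  unfold Spec_GenerateAnnulusRZPhiToNode GenerateAnnulusRZPhiToNode GenerateAnnulusRZPhiToNode_alt
  simp only [pvFoldI, List.nil_append, PySem.List.length_pyRange_one]
  have hSnn : (0:Int) ≤ max nZ 0 * max p 0 := mul_nonneg (le_max_right _ _) (le_max_right _ _)
  have hassoc : max nR 0 * max nZ 0 * max p 0 = 0 + max nR 0 * (max nZ 0 * max p 0) := by ring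
  rw [hassoc, pvChunkPyRange 0 (max nZ 0 * max p 0) (max nR 0) hSnn (le_max_right _ _)]
  rw [List.map_map]
  have hRn : (max nR 0).toNat = nR.toNat := by omega
  have hnn : ((nR : Int) - 0).toNat = nR.toNat := by omega
  rw [hRn, hnn]
  apply List.map_congr_left
  intro i _
  simp only [Function.comp]
  have hib : (0:Int) + ((i:Int) + 1) * (max nZ 0 * max p 0)
      = (0 + (i:Int) * (max nZ 0 * max p 0)) + max nZ 0 * (max p 0) := by ring
  rw [hib, pvChunkPyRange _ (max p 0) (max nZ 0) (le_max_right _ _) (le_max_right _ _)]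
  have hZn : (max nZ 0).toNat = nZ.toNat := by omega
  rw [hZn]
  apply List.map_congr_left
  intro j _
  rw [PySem.List.pyRange_one]
  have hlen : ((0:Int) + (i:Int) * (max nZ 0 * max p 0) + ((j:Int) + 1) * max p 0
      - (0 + (i:Int) * (max nZ 0 * max p 0) + (j:Int) * max p 0)).toNat = p.toNat := by
    have : (0:Int) + (i:Int) * (max nZ 0 * max p 0) + ((j:Int) + 1) * max p 0
        - (0 + (i:Int) * (max nZ 0 * max p 0) + (j:Int) * max p 0) = max p 0 := by ring
    rw [this]; omega
  rw [hlen]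
  apply List.map_congr_left
  intro t _
  have hZ : ((nZ.toNat : Int)) = max nZ 0 := Int.toNat_eq_max nZ
  have hP : ((p.toNat : Int)) = max p 0 := Int.toNat_eq_max p
  push_cast [hZ, hP]
  ring
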